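-- pv_equiv track=rewrite | github.com/proecheng/cad-spec-gen | tools/product_graph.py | _infer_parent_part_no
-- ===== SOURCE A (Python) =====
-- def _infer_parent_part_no(part_no: str, known_part_nos: list[str]) -> str | None:
--     candidates = [
--         candidate for candidate in known_part_nos
--         if candidate != part_no and part_no.startswith(candidate + "-")
--     ]
--     if not candidates:
--         return None
--     return max(candidates, key=len)
-- ===== SOURCE B (Python) =====
-- def _infer_parent_part_no(part_no: str, known_part_nos: list[str]) -> str | None:
--     for candidate in sorted(known_part_nos, key=len, reverse=True):
--         if candidate != part_no and part_no.startswith(candidate + "-"):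
--             return candidate
--     return None
-- ===== Notes on version B (the rewrite author's own statement) =====
-- stated objective: alternative
-- what changed: Replaces A's collect-all-matches-then-max-by-length with a sort-by-length-descending followed by a single early-returning scan that yields the first match.
import Mathlib
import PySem

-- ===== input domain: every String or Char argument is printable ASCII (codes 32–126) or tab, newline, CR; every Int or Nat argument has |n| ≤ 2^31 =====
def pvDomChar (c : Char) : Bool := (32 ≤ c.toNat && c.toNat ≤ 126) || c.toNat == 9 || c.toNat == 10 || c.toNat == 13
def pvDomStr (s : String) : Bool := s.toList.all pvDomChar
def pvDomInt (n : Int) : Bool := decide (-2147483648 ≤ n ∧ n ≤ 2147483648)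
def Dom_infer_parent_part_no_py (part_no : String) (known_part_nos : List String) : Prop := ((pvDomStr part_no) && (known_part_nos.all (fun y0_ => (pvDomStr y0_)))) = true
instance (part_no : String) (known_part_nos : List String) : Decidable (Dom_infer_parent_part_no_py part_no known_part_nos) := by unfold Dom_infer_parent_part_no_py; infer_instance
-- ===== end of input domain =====

-- B replaces A's collect-all-matches-then-max-by-length with sort-by-length-descending
-- plus a single early-returning scan (alternative decomposition, same result).


-- shared predicate: 'candidate != part_no and part_no.startswith(candidate + "-")'
def pvP (part_no candidate : String) : Bool :=
  candidate != part_no && PySem.Str.startswith part_no (candidate ++ "-")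

-- ===== PORT A =====
def infer_parent_part_no_py (part_no : String) (known_part_nos : List String) : Option String :=
  let candidates := known_part_nos.filter (fun c => pvP part_no c)
  if candidates.isEmpty then none
  else PySem.List.max? candidates (fun c => PySem.Str.len c)

-- ===== PORT B =====
def infer_parent_part_no_py_alt (part_no : String) (known_part_nos : List String) : Option String :=
  (PySem.List.sorted known_part_nos (fun c => PySem.Str.len c) true).find?
    (fun c => pvP part_no c)

-- ===== PRECONDITION & SPEC =====
def Spec_infer_parent_part_no_py (part_no : String) (known_part_nos : List String) (out : Option String) : Prop := out = infer_parent_part_no_py_alt part_no known_part_nos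
instance (part_no : String) (known_part_nos : List String) (out : Option String) : Decidable (Spec_infer_parent_part_no_py part_no known_part_nos out) := by unfold Spec_infer_parent_part_no_py; infer_instance

-- ===== CLAIM (what is proved, stated in full; the proofs are below) =====
def Claim_equal_infer_parent_part_no_py : Prop := ∀ (part_no : String) (known_part_nos : List String), Dom_infer_parent_part_no_py part_no known_part_nos → Spec_infer_parent_part_no_py part_no known_part_nos (infer_parent_part_no_py part_no known_part_nos)

-- ===== LEMMAS AND PROOFS =====

-- a matching candidate is a prefix of part_no (so it is determined by its length)
theorem pvP_prefix {pn c : String} (h : pvP pn c = true) : c.toList <+: pn.toList := by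
  have hs : PySem.Chars.startswith pn.toList (c.toList ++ ['-']) = true := by
    simp [pvP] at h; exact h.2
  have : c.toList ++ ['-'] <+: pn.toList := (PySem.Chars.startswith_iff _ _).mp hs
  exact (List.prefix_append c.toList ['-']).trans this

theorem pvP_uniq {pn m1 m2 : String} (h1 : pvP pn m1 = true) (h2 : pvP pn m2 = true)
    (hlen : m1.toList.length = m2.toList.length) : m1 = m2 := by
  have p1 := pvP_prefix h1
  have p2 := pvP_prefix h2
  have : m1.toList <+: m2.toList :=
    List.prefix_of_prefix_length_le p1 p2 (le_of_eq hlen)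
  have heq : m1.toList = m2.toList := List.IsPrefix.eq_of_length this hlen
  have := congrArg String.ofList heq
  simpa using this

-- first match in a key-descending list is key-maximal among all matches
theorem find?_desc_max {p : String → Bool} {key : String → Int} {m : String} :
    ∀ (l : List String), l.Pairwise (fun a b => key b ≤ key a) → l.find? p = some m →
      ∀ y ∈ l, p y = true → key y ≤ key m := by
  intro l
  induction l with
  | nil => intro _ h; simp at h
  | cons a t ih =>
    intro hpw hf y hy hpy
    rw [List.pairwise_cons] at hpw
    by_cases ha : p a = true
    · simp only [List.find?_cons, ha] at hf
      cases hf
      rcases List.mem_cons.mp hy with hy' | hy'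
      · simp [hy']
      · exact hpw.1 y hy'
    · simp only [List.find?_cons, ha] at hf
      rcases List.mem_cons.mp hy with hy' | hy'
      · exact absurd (hy' ▸ hpy) ha
      · exact ih hpw.2 hf y hy' hpy

-- ===== VERDICT (by name: the statement is the Claim_ definition above) =====
theorem infer_parent_part_no_py_spec : Claim_equal_infer_parent_part_no_py := by
  intro pn ks _
  unfold Spec_infer_parent_part_no_py infer_parent_part_no_py infer_parent_part_no_py_alt
  set cs := ks.filter (fun c => pvP pn c) with hcs
  by_cases hempty : cs.isEmpty
  · simp only [hempty, if_true]
    symm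
    rw [List.find?_eq_none]
    intro y hy
    have hyks : y ∈ ks := (PySem.List.mem_sorted _ _ _ _).mp hy
    have : ∀ a ∈ ks, ¬ (pvP pn a = true) := by
      rw [List.isEmpty_iff] at hempty
      have := List.filter_eq_nil_iff.mp (hcs ▸ hempty)
      simpa using this
    simpa using this y hyks
  · rw [if_neg hempty]
    -- A's result
    have hne : cs ≠ [] := by simpa [List.isEmpty_iff] using hempty
    obtain ⟨m1, hm1⟩ : ∃ m1, PySem.List.max? cs (fun c => PySem.Str.len c) = some m1 := by
      cases h : PySem.List.max? cs (fun c => PySem.Str.len c) with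
      | none => exact absurd ((PySem.List.max?_eq_none_iff _ _).mp h) hne
      | some m => exact ⟨m, rfl⟩
    have hm1cs : m1 ∈ cs := PySem.List.max?_mem hm1
    have hm1max : ∀ y ∈ cs, PySem.Str.len y ≤ PySem.Str.len m1 := PySem.List.max?_isMax hm1
    have hm1ks : m1 ∈ ks := List.mem_of_mem_filter hm1cs
    have hm1p : pvP pn m1 = true := by simpa using List.of_mem_filter hm1cs
    -- B's result
    obtain ⟨m2, hm2⟩ : ∃ m2,
        (PySem.List.sorted ks (fun c => PySem.Str.len c) true).find? (fun c => pvP pn c) = some m2 := by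
      cases h : (PySem.List.sorted ks (fun c => PySem.Str.len c) true).find? (fun c => pvP pn c) with
      | none =>
        rw [List.find?_eq_none] at h
        exact absurd ((h m1 ((PySem.List.mem_sorted _ _ _ _).mpr hm1ks))) (by simp [hm1p])
      | some m => exact ⟨m, rfl⟩
    have hm2p : pvP pn m2 = true := by simpa using List.find?_some hm2
    have hm2ks : m2 ∈ ks := (PySem.List.mem_sorted _ _ _ _).mp (List.mem_of_find?_eq_some hm2)
    have hm2cs : m2 ∈ cs := by rw [hcs]; exact List.mem_filter.mpr ⟨hm2ks, by simpa using hm2p⟩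
    -- m1 = m2 by length
    have h12 : PySem.Str.len m1 ≤ PySem.Str.len m2 :=
      find?_desc_max _ (PySem.List.sorted_pairwise_rev ks (fun c => PySem.Str.len c)) hm2
        m1 ((PySem.List.mem_sorted _ _ _ _).mpr hm1ks) hm1p
    have h21 : PySem.Str.len m2 ≤ PySem.Str.len m1 := hm1max m2 hm2cs
    have hlen : m1.toList.length = m2.toList.length := by
      have : PySem.Str.len m1 = PySem.Str.len m2 := le_antisymm h12 h21
      simpa [PySem.Str.len_eq, PySem.Chars.len_eq] using this
    rw [hm1, hm2, pvP_uniq hm1p hm2p hlen]
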